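-- pv_equiv track=rewrite | github.com/andreylogachev/Algorithms-theory-and-practice.-Data-structures | 3 - хеш таблицы/tasks/alg carp-rabin.py | calc_hash_and_x_pow
-- ===== SOURCE A (Python) =====
-- def calc_hash_and_x_pow(s, x, p):
--     n = len(s)
--     x_pow_i = 1
--     h = 0
--     for i in range(n):
--         h += ord(s[i]) * x_pow_i % p
--         h %= p
--         if i < n - 1:
--             x_pow_i *= x
--             x_pow_i %= p
--     return h, x_pow_i
-- ===== SOURCE B (Python) =====
-- def calc_hash_and_x_pow(s, x, p):
--     # Horner's rule over the reversed string for the hash; a separate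
--     # small loop for x^(n-1) mod p (left unreduced as 1 when n <= 1, as specified).
--     h = 0
--     for c in reversed(s):
--         h = (h * x + ord(c)) % p
--     x_pow = 1
--     for _ in range(len(s) - 1):
--         x_pow = x_pow * x % p
--     return h, x_pow
-- ===== Notes on version B (the rewrite author's own statement) =====
-- stated objective: alternative
-- what changed: Replaces A's single fused pass that carries a running power x^i with Horner's rule over the reversed string for the hash plus a separate small loop for x^(n-1) mod p.
import Mathlib
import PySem

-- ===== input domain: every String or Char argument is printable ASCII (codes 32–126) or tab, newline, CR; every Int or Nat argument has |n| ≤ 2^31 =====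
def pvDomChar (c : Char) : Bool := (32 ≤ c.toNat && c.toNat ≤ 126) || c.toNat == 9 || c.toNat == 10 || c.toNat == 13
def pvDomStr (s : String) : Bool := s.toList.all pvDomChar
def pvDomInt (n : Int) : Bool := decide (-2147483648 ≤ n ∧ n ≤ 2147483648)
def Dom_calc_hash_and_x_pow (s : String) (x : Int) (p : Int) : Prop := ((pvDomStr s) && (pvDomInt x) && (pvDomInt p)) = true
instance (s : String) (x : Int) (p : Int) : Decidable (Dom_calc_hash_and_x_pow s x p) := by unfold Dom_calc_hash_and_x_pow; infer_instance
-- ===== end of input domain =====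

-- B computes the same (hash, x^(n-1) mod p) with Horner's rule over the reversed string
-- plus a separate power loop, instead of A's single fused pass carrying a running power (objective: alternative).


-- ===== PORT A =====
def calc_hash_and_x_pow (s : String) (x : Int) (p : Int) : Int × Int :=
  let cs := s.toList
  let n : Int := PySem.List.len cs
  (PySem.List.pyRange 0 n).foldl
    (fun (st : Int × Int) (i : Int) =>
      let h := PySem.Int.mod (st.1 + PySem.Int.mod (((PySem.List.pyGetD cs i ' ').toNat : Int) * st.2) p) p
      let xp := if i < n - 1 then PySem.Int.mod (st.2 * x) p else st.2
      (h, xp))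
    (0, 1)

-- ===== PORT B =====
def calc_hash_and_x_pow_alt (s : String) (x : Int) (p : Int) : Int × Int :=
  let cs := s.toList
  let h := cs.reverse.foldl (fun h c => PySem.Int.mod (h * x + (c.toNat : Int)) p) 0
  let xp := (PySem.List.pyRange 0 (PySem.List.len cs - 1)).foldl
    (fun z _ => PySem.Int.mod (z * x) p) 1
  (h, xp)

-- ===== PRECONDITION & SPEC =====
-- Pre_ excludes exactly the inputs where Python A raises ZeroDivisionError: p = 0 with a nonempty string.
def Pre_calc_hash_and_x_pow (s : String) (x : Int) (p : Int) : Prop := s.toList = [] ∨ p ≠ 0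
instance (s : String) (x : Int) (p : Int) : Decidable (Pre_calc_hash_and_x_pow s x p) := by unfold Pre_calc_hash_and_x_pow; infer_instance
def pvWitness_calc_hash_and_x_pow : String × Int × Int := ("ab", 3, 7)

def Spec_calc_hash_and_x_pow (s : String) (x : Int) (p : Int) (out : Int × Int) : Prop := out = calc_hash_and_x_pow_alt s x p
instance (s : String) (x : Int) (p : Int) (out : Int × Int) : Decidable (Spec_calc_hash_and_x_pow s x p out) := by unfold Spec_calc_hash_and_x_pow; infer_instance

-- ===== CLAIM (what is proved, stated in full; the proofs are below) =====
def Claim_equal_calc_hash_and_x_pow : Prop := ∀ (s : String) (x : Int) (p : Int), Dom_calc_hash_and_x_pow s x p → Pre_calc_hash_and_x_pow s x p → Spec_calc_hash_and_x_pow s x p (calc_hash_and_x_pow s x p)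

-- ===== LEMMAS AND PROOFS =====

-- fmod facts --------------------------------------------------------------

theorem pvFmodEmod (a p : Int) : (Int.fmod a p) % p = a % p := by
  rw [Int.fmod_eq_emod]
  split_ifs with h
  · simp [Int.emod_emod_of_dvd a (dvd_refl p)]
  · have := Int.add_mul_emod_self_left (a % p) p 1
    simpa [Int.emod_emod_of_dvd a (dvd_refl p)] using this

theorem pvFmodCongr {a b : Int} (p : Int) (h : a % p = b % p) :
    Int.fmod a p = Int.fmod b p := by
  have hd : (p ∣ a) ↔ (p ∣ b) := by
    rw [Int.dvd_iff_emod_eq_zero, Int.dvd_iff_emod_eq_zero, h]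
  rw [Int.fmod_eq_emod, Int.fmod_eq_emod, h]
  by_cases h0 : 0 ≤ p <;> simp [h0, hd]

theorem pvFmodIdem (a p : Int) : Int.fmod (Int.fmod a p) p = Int.fmod a p :=
  Int.fmod_fmod_of_dvd a (dvd_refl p)

-- proof-side recursion mirroring A's fused loop ---------------------------

def aLoop (x p : Int) : List Char → Int → Int → Int × Int
  | [], h, xp => (h, xp)
  | c :: t, h, xp =>
    let h' := Int.fmod (h + Int.fmod ((c.toNat : Int) * xp) p) p
    match t with
    | [] => (h', xp)
    | t1 :: t2 => aLoop x p (t1 :: t2) h' (Int.fmod (xp * x) p)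

def poly (x : Int) : List Char → Int
  | [] => 0
  | c :: t => (c.toNat : Int) + x * poly x t

-- A's fold over range(n) equals the structural recursion aLoop
theorem pvBridgeA (cs : List Char) (x p : Int) :
    ∀ (k a : Nat) (h xp : Int), cs.length = a + k →
      (PySem.List.pyRange (a : Int) (PySem.List.len cs)).foldl
        (fun (st : Int × Int) (i : Int) =>
          let h := PySem.Int.mod (st.1 + PySem.Int.mod (((PySem.List.pyGetD cs i ' ').toNat : Int) * st.2) p) p
          let xp := if i < (PySem.List.len cs) - 1 then PySem.Int.mod (st.2 * x) p else st.2
          (h, xp)) (h, xp)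
      = aLoop x p (cs.drop a) h xp := by
  intro k
  induction k with
  | zero =>
    intro a h xp hlen
    have h1 : PySem.List.pyRange (a : Int) (PySem.List.len cs) = [] := by
      have : PySem.List.len cs = (a : Int) := by simp [PySem.List.len, hlen]
      rw [this]
      simp [PySem.List.pyRange]
    have h2 : cs.drop a = [] := by
      apply List.drop_eq_nil_of_le; omega
    rw [h1, h2]; rfl
  | succ m ih =>
    intro a h xp hlen
    have ha : (a : Int) < PySem.List.len cs := by simp [PySem.List.len]; omega
    rw [PySem.List.pyRange_one_cons ha]
    have hget : PySem.List.pyGetD cs (a : Int) ' ' = cs.getD a ' ' :=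
      PySem.List.pyGetD_natCast cs a ' '
    have halt : a < cs.length := by omega
    have hdrop : cs.drop a = cs[a] :: cs.drop (a + 1) := List.drop_eq_getElem_cons halt
    have hgetD : cs.getD a ' ' = cs[a] := by
      simp [List.getD, halt]
    simp only [List.foldl_cons]
    have hcast : ((a : Int) + 1) = ((a + 1 : Nat) : Int) := by push_cast; ring
    rw [hcast, ih (a + 1) _ _ (by omega)]
    rw [hdrop]
    cases hm : m with
    | zero =>
      -- last iteration: a = length - 1
      have hcond : ¬ ((a : Int) < PySem.List.len cs - 1) := by
        simp [PySem.List.len]; omega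
      have hdropnil : cs.drop (a + 1) = [] := by
        apply List.drop_eq_nil_of_le; omega
      rw [hdropnil]
      simp only [hcond, if_false, hget, hgetD]
      rfl
    | succ m' =>
      have hcond : ((a : Int) < PySem.List.len cs - 1) := by
        simp [PySem.List.len]; omega
      have hdropne : cs.drop (a + 1) ≠ [] := by
        simp [List.drop_eq_nil_iff]; omega
      obtain ⟨d, ds, hds⟩ := List.exists_cons_of_ne_nil hdropne
      rw [hds]
      simp only [hcond, if_true, hget, hgetD]
      rfl

-- hash invariant for aLoop
theorem pvALoopFst (x p : Int) : ∀ (cs : List Char), cs ≠ [] → ∀ (h xp : Int),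
    ((aLoop x p cs h xp).1 % p = (h + xp * poly x cs) % p) ∧
    (∃ w, (aLoop x p cs h xp).1 = Int.fmod w p) := by
  intro cs
  induction cs with
  | nil => intro hne; exact absurd rfl hne
  | cons c t ih =>
    intro _ h xp
    cases t with
    | nil =>
      constructor
      · show (Int.fmod (h + Int.fmod ((c.toNat : Int) * xp) p) p) % p = _
        calc (Int.fmod (h + Int.fmod ((c.toNat : Int) * xp) p) p) % p
            = (h + Int.fmod ((c.toNat : Int) * xp) p) % p := pvFmodEmod _ p
          _ = (h % p + (Int.fmod ((c.toNat : Int) * xp) p) % p) % p := by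
                rw [Int.add_emod]
          _ = (h % p + ((c.toNat : Int) * xp) % p) % p := by rw [pvFmodEmod]
          _ = (h + (c.toNat : Int) * xp) % p := by rw [← Int.add_emod]
          _ = (h + xp * poly x [c]) % p := by simp [poly]; ring_nf
      · exact ⟨_, rfl⟩
    | cons t1 t2 =>
      have hne' : t1 :: t2 ≠ [] := by simp
      obtain ⟨ihc, ihe⟩ := ih hne' (Int.fmod (h + Int.fmod ((c.toNat : Int) * xp) p) p)
        (Int.fmod (xp * x) p)
      constructor
      · show (aLoop x p (t1 :: t2) _ _).1 % p = _
        rw [ihc]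
        have e1 : (Int.fmod (h + Int.fmod ((c.toNat : Int) * xp) p) p) % p
            = (h + (c.toNat : Int) * xp) % p := by
          rw [pvFmodEmod, Int.add_emod, pvFmodEmod, ← Int.add_emod]
        have e2 : (Int.fmod (xp * x) p) % p = (xp * x) % p := pvFmodEmod _ p
        have hm1 : Int.ModEq p (Int.fmod (h + Int.fmod ((c.toNat : Int) * xp) p) p)
            (h + (c.toNat : Int) * xp) := e1
        have hm2 : Int.ModEq p (Int.fmod (xp * x) p) (xp * x) := e2
        have := (hm1.add (hm2.mul_right (poly x (t1 :: t2))))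
        calc (Int.fmod (h + Int.fmod ((c.toNat : Int) * xp) p) p
                + Int.fmod (xp * x) p * poly x (t1 :: t2)) % p
            = (h + (c.toNat : Int) * xp + xp * x * poly x (t1 :: t2)) % p := this
          _ = (h + xp * poly x (c :: t1 :: t2)) % p := by
                show _ = (h + xp * ((c.toNat : Int) + x * poly x (t1 :: t2))) % p
                ring_nf
      · exact ihe

-- power component of aLoop
theorem pvALoopSnd (x p : Int) : ∀ (cs : List Char) (h xp : Int),
    (aLoop x p cs h xp).2 = (fun z => Int.fmod (z * x) p)^[cs.length - 1] xp := by
  intro cs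
  induction cs with
  | nil => intro h xp; rfl
  | cons c t ih =>
    intro h xp
    cases t with
    | nil => rfl
    | cons t1 t2 =>
      show (aLoop x p (t1 :: t2) _ _).2 = _
      rw [ih]
      have : (c :: t1 :: t2).length - 1 = ((t1 :: t2).length - 1) + 1 := by
        simp
      rw [this, Function.iterate_succ_apply]

-- B's Horner fold invariant
theorem pvHorner (x p : Int) : ∀ (cs : List Char) (h : Int),
    ((cs.reverse.foldl (fun h c => PySem.Int.mod (h * x + (c.toNat : Int)) p) h) % p
        = (h * x ^ cs.length + poly x cs) % p) ∧
    (cs ≠ [] → ∃ w, cs.reverse.foldl (fun h c => PySem.Int.mod (h * x + (c.toNat : Int)) p) h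
        = Int.fmod w p) := by
  intro cs
  induction cs with
  | nil => intro h; constructor
           · simp [poly]
           · intro hne; exact absurd rfl hne
  | cons c t ih =>
    intro h
    have hrev : (c :: t).reverse = t.reverse ++ [c] := by simp
    rw [hrev, List.foldl_append]
    constructor
    · show (PySem.Int.mod ((t.reverse.foldl _ h) * x + (c.toNat : Int)) p) % p = _
      simp only [PySem.Int.mod]
      obtain ⟨ihc, _⟩ := ih h
      have hm : Int.ModEq p (t.reverse.foldl (fun h c => PySem.Int.mod (h * x + (c.toNat : Int)) p) h)
          (h * x ^ t.length + poly x t) := ihc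
      have := (hm.mul_right x).add_right ((c.toNat : Int))
      calc (Int.fmod ((t.reverse.foldl (fun h c => PySem.Int.mod (h * x + (c.toNat : Int)) p) h) * x + (c.toNat : Int)) p) % p
          = ((t.reverse.foldl (fun h c => PySem.Int.mod (h * x + (c.toNat : Int)) p) h) * x + (c.toNat : Int)) % p := pvFmodEmod _ p
        _ = ((h * x ^ t.length + poly x t) * x + (c.toNat : Int)) % p := this
        _ = (h * x ^ (c :: t).length + poly x (c :: t)) % p := by
              show _ = (h * x ^ (t.length + 1) + ((c.toNat : Int) + x * poly x t)) % p
              ring_nf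
    · intro _; exact ⟨_, rfl⟩

-- a fold that ignores its list elements is function iteration
theorem pvFoldlConst {β : Type} (f : Int → Int) : ∀ (l : List β) (z : Int),
    l.foldl (fun z _ => f z) z = f^[l.length] z := by
  intro l
  induction l with
  | nil => intro z; rfl
  | cons b t ih => intro z; simp [List.foldl_cons, ih, Function.iterate_succ_apply]

-- B's power loop is the same iteration
theorem pvBPow (x p : Int) (cs : List Char) :
    (PySem.List.pyRange 0 (PySem.List.len cs - 1)).foldl
      (fun z _ => PySem.Int.mod (z * x) p) 1
    = (fun z => Int.fmod (z * x) p)^[cs.length - 1] 1 := by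
  cases cs with
  | nil =>
    have : PySem.List.pyRange 0 (PySem.List.len ([] : List Char) - 1) = [] := by decide
    rw [this]; rfl
  | cons c t =>
    have hcast : PySem.List.len (c :: t) - 1 = ((t.length : Nat) : Int) := by
      simp [PySem.List.len]
    rw [hcast, PySem.List.pyRange_zero_natCast]
    simp only [PySem.Int.mod]
    rw [pvFoldlConst (fun z => Int.fmod (z * x) p)]
    simp

-- ===== VERDICT (by name: the statement is the Claim_ definition above) =====
theorem calc_hash_and_x_pow_spec : Claim_equal_calc_hash_and_x_pow := by
  intro s x p _hdom _hpre
  show calc_hash_and_x_pow s x p = calc_hash_and_x_pow_alt s x p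
  unfold calc_hash_and_x_pow calc_hash_and_x_pow_alt
  simp only []
  have hbridge := pvBridgeA s.toList x p s.toList.length 0 0 1 (by omega)
  simp only [Nat.cast_zero] at hbridge
  rw [hbridge, List.drop_zero]
  cases hcs : s.toList with
  | nil =>
    simp [aLoop, PySem.List.len, PySem.List.pyRange]
  | cons c t =>
    have hne : (c :: t) ≠ [] := by simp
    apply Prod.ext
    · -- hash components
      obtain ⟨ha, wa, hwa⟩ := pvALoopFst x p (c :: t) hne 0 1
      obtain ⟨hb, hbe⟩ := pvHorner x p (c :: t) 0
      obtain ⟨wb, hwb⟩ := hbe hne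
      show (aLoop x p (c :: t) 0 1).1 = _
      have hmodeq : (aLoop x p (c :: t) 0 1).1 % p
          = ((c :: t).reverse.foldl (fun h ch => PySem.Int.mod (h * x + (ch.toNat : Int)) p) 0) % p := by
        rw [ha, hb]; ring_nf
      calc (aLoop x p (c :: t) 0 1).1
          = Int.fmod (aLoop x p (c :: t) 0 1).1 p := by rw [hwa, pvFmodIdem]
        _ = Int.fmod ((c :: t).reverse.foldl (fun h ch => PySem.Int.mod (h * x + (ch.toNat : Int)) p) 0) p :=
            pvFmodCongr p hmodeq
        _ = (c :: t).reverse.foldl (fun h ch => PySem.Int.mod (h * x + (ch.toNat : Int)) p) 0 := by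
            rw [hwb, pvFmodIdem]
    · -- power components
      show (aLoop x p (c :: t) 0 1).2 = _
      rw [pvALoopSnd, pvBPow]
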